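-- pv_equiv track=rewrite | github.com/S0NGMinHyuk/Algorithm-Coding-Test | 프로그래머스/3/49191. 순위/순위.py | getMatcher
-- ===== SOURCE A (Python) =====
-- from collections import deque
--
-- def getMatcher(me, n, table):  # 내가 승패를 알 수 있는 선수의 수를 리턴 (본인 포함))
--     matcher = [0] * (n+1)
--     matcher[me] = 1
--
--     q = deque([me])
--     while q:    # 자신을 이긴 선수들을 계속 타고 올라가기
--         man = q.popleft()
--         if man not in table:
--             continue
--         for enemy in table[man][0]:
--             if matcher[enemy] == 0:
--                 matcher[enemy] = 1
--                 q.append(enemy)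
--
--     q = deque([me])
--     while q:    # 자신이 이긴 선수들을 계속 타고 내려가기
--         man = q.popleft()
--         if man not in table:
--             continue
--         for enemy in table[man][1]:
--             if matcher[enemy] == 0:
--                 matcher[enemy] = 1
--                 q.append(enemy)
--     return sum(matcher) # 승패를 알 수 있는 선수의 수를 리턴
-- ===== SOURCE B (Python) =====
-- def getMatcher(me, n, table):
--     # Semi-naive fixpoint saturation: no worklist at all. Repeatedly sweep every
--     # table row and propagate edges whose source is active, until a full sweep
--     # adds nobody. 'active' is me plus the players first reached in the current
--     # direction, so already-known players never propagate (as in the original).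
--     vis = {me}
--     for d in (0, 1):
--         active = {me}
--         changed = True
--         while changed:
--             changed = False
--             for man, row in table.items():
--                 if man in active:
--                     for e in row[d]:
--                         if e not in vis:
--                             vis.add(e)
--                             active.add(e)
--                             changed = True
--     return len(vis)
-- ===== Notes on version B (the rewrite author's own statement) =====
-- stated objective: alternative
-- what changed: Replaces A's worklist BFS (a FIFO queue of pending nodes, two copy-pasted while-loops over a 0/1 marker array) by a worklist-free semi-naive fixpoint saturation: repeatedly sweep the whole edge table, firing every row whose source is active, until one full sweep adds nothing; both compute the same least closed set, so the count is unchanged.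
-- outside the precondition, e.g. on getMatcher(-1, 2, {}): A returns 1, B returns 1; on getMatcher(0, 1, {0: [[-1], [1]]}): A returns 2, B returns 3; on getMatcher(0, 155, {0: [[1, 6], [2, 154], [6, 6]], 125: [[-1, -1, 9]]}): A returns 5, B returns 5
import Mathlib
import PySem

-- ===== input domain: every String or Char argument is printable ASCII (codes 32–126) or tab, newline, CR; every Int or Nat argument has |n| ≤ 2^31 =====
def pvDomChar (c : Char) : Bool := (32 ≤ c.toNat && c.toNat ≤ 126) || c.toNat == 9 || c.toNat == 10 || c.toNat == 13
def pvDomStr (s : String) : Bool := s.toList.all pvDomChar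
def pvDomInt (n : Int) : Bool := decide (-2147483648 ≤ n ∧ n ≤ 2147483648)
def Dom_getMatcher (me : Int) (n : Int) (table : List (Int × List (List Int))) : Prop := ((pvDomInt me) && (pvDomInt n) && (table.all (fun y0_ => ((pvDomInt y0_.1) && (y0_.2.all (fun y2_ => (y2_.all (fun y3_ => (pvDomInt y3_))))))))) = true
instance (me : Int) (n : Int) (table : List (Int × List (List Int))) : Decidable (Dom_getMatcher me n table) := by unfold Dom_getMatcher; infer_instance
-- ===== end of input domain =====

-- B replaces A's worklist BFS (FIFO queue, 0/1 marker array, two copied loops) by a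
-- worklist-free semi-naive fixpoint saturation sweeping the whole edge table until a
-- sweep adds nothing; same value, different algorithm (objective: alternative).

-- ===== PORT A =====
-- the dict access 'table[man][d]' (with [] where Python's 'man not in table' skips)
def pvSucc (table : List (Int × List (List Int))) (d : Int) (man : Int) : List Int :=
  match (PySem.Dict.mk table).get? man with
  | none => []                                     -- 'if man not in table: continue'
  | some ls => (PySem.List.pyGet? ls d).getD []    -- table[man][d]; in range under Pre_

-- 'if matcher[enemy] == 0: matcher[enemy] = 1; q.append(enemy)'
-- (pyGet? = none is Python's IndexError, excluded by Pre_; the branch then skips)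
def pvStepA (st : List Int × List Int) (e : Int) : List Int × List Int :=
  if PySem.List.pyGet? st.1 e = some 0 then (PySem.List.pySetD st.1 e 1, st.2 ++ [e]) else st

-- 'while q: man = q.popleft(); for enemy in table[man][d]: ...' (fuel = totality guard)
def pvBfsA (succ : Int → List Int) : Nat → List Int → List Int → List Int
  | _, m, [] => m
  | 0, m, _ :: _ => m
  | fuel+1, m, man :: q =>
      let st := (succ man).foldl pvStepA (m, [])
      pvBfsA succ fuel st.1 (q ++ st.2)

def getMatcher (me : Int) (n : Int) (table : List (Int × List (List Int))) : Int :=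
  let matcher := PySem.List.pySetD (List.replicate (n+1).toNat (0:Int)) me 1
  let fuel := (n+1).toNat + 1      -- never exhausted under Pre_ (proved below)
  let m1 := pvBfsA (pvSucc table 0) fuel matcher [me]
  let m2 := pvBfsA (pvSucc table 1) fuel m1 [me]
  m2.sum

-- ===== PORT B =====
-- 'if e not in vis: vis.add(e); active.add(e); changed = True'
def pvStepB (st : PySem.Set Int × PySem.Set Int × Bool) (e : Int) :
    PySem.Set Int × PySem.Set Int × Bool :=
  if e ∈ st.1 then st else (PySem.Set.add st.1 e, PySem.Set.add st.2.1 e, true)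

-- one sweep: 'for man, row in table.items(): if man in active: for e in row[d]: ...'
-- (row[d] out of range is Python's IndexError, excluded by Pre_; .getD [] then skips)
def pvSweep (d : Int) : List (Int × List (List Int)) → PySem.Set Int → PySem.Set Int → Bool →
    PySem.Set Int × PySem.Set Int × Bool
  | [], vis, act, ch => (vis, act, ch)
  | (man, row) :: tl, vis, act, ch =>
      if man ∈ act then
        let st := ((PySem.List.pyGet? row d).getD []).foldl pvStepB (vis, act, ch)
        pvSweep d tl st.1 st.2.1 st.2.2
      else pvSweep d tl vis act ch

-- 'changed = True; while changed: changed = False; <sweep>' (fuel = totality guard)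
def pvSat (d : Int) (items : List (Int × List (List Int))) :
    Nat → PySem.Set Int → PySem.Set Int → PySem.Set Int
  | 0, vis, _ => vis
  | fuel+1, vis, act =>
      let st := pvSweep d items vis act false
      if st.2.2 then pvSat d items fuel st.1 st.2.1 else st.1

def getMatcher_alt (me : Int) (n : Int) (table : List (Int × List (List Int))) : Int :=
  let fuel := (n+1).toNat + 1      -- never exhausted under Pre_ (proved below)
  let v0 : PySem.Set Int := PySem.Set.add PySem.Set.empty me    -- vis = {me}
  let v1 := pvSat 0 table fuel v0 (PySem.Set.add PySem.Set.empty me)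
  let v2 := pvSat 1 table fuel v1 (PySem.Set.add PySem.Set.empty me)
  PySem.Set.len v2

-- ===== PRECONDITION & SPEC =====
-- Pre_ restricts to the problem's natural domain, where A returns without exception:
-- player numbers 0..n (a negative me or opponent silently wraps around the marker array,
-- an opponent > n or a row shorter than 2 raises IndexError when reached), distinct dict
-- keys (a dict cannot repeat keys), and — unless me is no key at all, in which case A
-- touches no row — well-formed rows at every key in 0..n (keys outside 0..n are
-- unreachable; demanded at every in-range key, not only the reachable ones, since
-- reachability is not closed-form).
def Pre_getMatcher (me : Int) (n : Int) (table : List (Int × List (List Int))) : Prop :=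
  0 ≤ me ∧ me ≤ n ∧ (table.map Prod.fst).Nodup ∧
  (me ∉ table.map Prod.fst ∨
    ∀ p ∈ table, (0 ≤ p.1 ∧ p.1 ≤ n) →
      2 ≤ p.2.length ∧ ∀ l ∈ p.2.take 2, ∀ x ∈ l, 0 ≤ x ∧ x ≤ n)
instance (me : Int) (n : Int) (table : List (Int × List (List Int))) : Decidable (Pre_getMatcher me n table) := by unfold Pre_getMatcher; infer_instance

def pvWitness_getMatcher : Int × Int × (List (Int × List (List Int))) := (0, 1, [(0, [[1], []])])

def Spec_getMatcher (me : Int) (n : Int) (table : List (Int × List (List Int))) (out : Int) : Prop := out = getMatcher_alt me n table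
instance (me : Int) (n : Int) (table : List (Int × List (List Int))) (out : Int) : Decidable (Spec_getMatcher me n table out) := by unfold Spec_getMatcher; infer_instance

-- ===== CLAIM (what is proved, stated in full; the proofs are below) =====
def Claim_equal_getMatcher : Prop := ∀ (me : Int) (n : Int) (table : List (Int × List (List Int))), Dom_getMatcher me n table → Pre_getMatcher me n table → Spec_getMatcher me n table (getMatcher me n table)

-- ===== LEMMAS AND PROOFS =====

-- A's marker array as a function of the visited set
def pvMform (N : Nat) (V : List Int) : List Int :=
  (List.range N).map (fun (i : Nat) => if (i:Int) ∈ V then (1:Int) else 0)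

lemma pvMform_length (N : Nat) (V : List Int) : (pvMform N V).length = N := by
  simp [pvMform]

lemma pvMform_getElem? (N : Nat) (V : List Int) (j : Nat) (h : j < N) :
    (pvMform N V)[j]? = some (if (j:Int) ∈ V then (1:Int) else 0) := by
  rw [pvMform, List.getElem?_map, List.getElem?_range h]
  rfl

lemma pvMform_get (N : Nat) (V : List Int) (e : Int) (h0 : 0 ≤ e) (h1 : e < (N:Int)) :
    PySem.List.pyGet? (pvMform N V) e = some (if e ∈ V then (1:Int) else 0) := by
  have ht : e.toNat < N := by omega
  have he : ((e.toNat : Int)) = e := Int.toNat_of_nonneg h0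
  rw [PySem.List.pyGet?_of_nonneg _ h0, pvMform_getElem? N V e.toNat ht, he]

lemma pvMform_set (N : Nat) (V : List Int) (e : Int) (h0 : 0 ≤ e) (h1 : e < (N:Int)) :
    PySem.List.pySetD (pvMform N V) e 1 = pvMform N (V ++ [e]) := by
  have ht : e.toNat < N := by omega
  have he : ((e.toNat : Int)) = e := Int.toNat_of_nonneg h0
  rw [PySem.List.pySetD_of_nonneg _ _ h0]
  apply List.ext_getElem?
  intro j
  by_cases hj : j < N
  · rw [List.getElem?_set, pvMform_getElem? N _ j hj, pvMform_getElem? N _ j hj]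
    by_cases hje : e.toNat = j
    · subst hje
      simp [he, pvMform_length, hj]
    · have hne : ((j:Int)) ≠ e := by omega
      simp only [hje, if_false, List.mem_append, List.mem_singleton, hne, or_false]
  · have h1l : (((pvMform N V).set e.toNat 1)).length ≤ j := by
      rw [List.length_set, pvMform_length]; omega
    have h2l : (pvMform N (V ++ [e])).length ≤ j := by rw [pvMform_length]; omega
    rw [List.getElem?_eq_none h1l, List.getElem?_eq_none h2l]

lemma pvLenLe (N : Nat) (V : List Int) (hnd : V.Nodup) (hb : ∀ x ∈ V, 0 ≤ x ∧ x < (N:Int)) :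
    V.length ≤ N := by
  have hinj : ∀ x ∈ V, ∀ y ∈ V, x.toNat = y.toNat → x = y := by
    intro x hx y hy h
    have := (hb x hx).1; have := (hb y hy).1; omega
  have hnd' : (V.map Int.toNat).Nodup := List.Nodup.map_on hinj hnd
  have hsub : (V.map Int.toNat) ⊆ List.range N := by
    intro j hj
    simp only [List.mem_map] at hj
    obtain ⟨x, hx, rfl⟩ := hj
    have := hb x hx
    simp only [List.mem_range]; omega
  have h1 : (V.map Int.toNat).toFinset.card = (V.map Int.toNat).length :=
    List.toFinset_card_of_nodup hnd'
  have h2 : (V.map Int.toNat).toFinset ⊆ (List.range N).toFinset := by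
    intro x hx; simp only [List.mem_toFinset] at *; exact hsub hx
  have h3 := Finset.card_le_card h2
  have h4 : (List.range N).toFinset.card ≤ (List.range N).length := List.toFinset_card_le _
  have h5 : (V.map Int.toNat).length = V.length := List.length_map ..
  have h6 : (List.range N).length = N := List.length_range ..
  omega

-- sum(matcher) counts exactly the visited players
lemma pvSumMform (N : Nat) (V : List Int) (hnd : V.Nodup) (hb : ∀ x ∈ V, 0 ≤ x ∧ x < (N:Int)) :
    (pvMform N V).sum = (V.length : Int) := by
  unfold pvMform
  calc ((List.range N).map (fun (i : Nat) => if (i:Int) ∈ V then (1:Int) else 0)).sum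
      = ((List.range N).map (fun (i : Nat) => if (decide ((i:Int) ∈ V)) = true then (1:Int) else 0)).sum := by
        simp
    _ = ((List.range N).countP (fun (i : Nat) => decide ((i:Int) ∈ V)) : Int) :=
        PySem.List.sum_map_ite_one_zero _ _
    _ = (V.length : Int) := by
        congr 1
        rw [List.countP_eq_length_filter]
        have hperm : ((List.range N).filter (fun (i : Nat) => decide ((i:Int) ∈ V))).Perm
            (V.map Int.toNat) := by
          refine (List.perm_ext_iff_of_nodup ?_ ?_).mpr ?_
          · exact List.Nodup.filter _ (List.nodup_range)
          · refine List.Nodup.map_on ?_ hnd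
            intro x hx y hy h
            have := (hb x hx).1; have := (hb y hy).1; omega
          · intro j
            simp only [List.mem_filter, List.mem_range, List.mem_map, decide_eq_true_eq]
            constructor
            · rintro ⟨hjN, hjV⟩; exact ⟨j, hjV, by omega⟩
            · rintro ⟨x, hx, rfl⟩
              have := hb x hx
              refine ⟨by omega, ?_⟩
              rw [Int.toNat_of_nonneg this.1]; exact hx
        rw [hperm.length_eq, List.length_map]

-- A's inner for-loop over one neighbour list appends exactly the fresh nodes δ
lemma pvFoldA (N : Nat) :
    ∀ (es V ds : List Int), (∀ e ∈ es, 0 ≤ e ∧ e < (N:Int)) → V.Nodup →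
    ∃ δ : List Int,
      es.foldl pvStepA (pvMform N V, ds) = (pvMform N (V ++ δ), ds ++ δ) ∧
      (V ++ δ).Nodup ∧ (∀ x ∈ δ, x ∈ es ∧ x ∉ V) ∧
      (∀ e ∈ es, e ∈ V ++ δ) := by
  intro es
  induction es with
  | nil =>
    intro V ds _ hnd
    exact ⟨[], by simp, by simpa using hnd, by simp, by simp⟩
  | cons e es ih =>
    intro V ds hes hnd
    have hes' : ∀ x ∈ es, 0 ≤ x ∧ x < (N:Int) := fun x hx => hes x (List.mem_cons_of_mem _ hx)
    have hb := hes e (List.mem_cons_self ..)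
    by_cases hmem : e ∈ V
    · have hA : pvStepA (pvMform N V, ds) e = (pvMform N V, ds) := by
        unfold pvStepA
        rw [pvMform_get N V e hb.1 hb.2]
        simp [hmem]
      rw [List.foldl_cons, hA]
      obtain ⟨δ, h1, h2, h3, h4⟩ := ih V ds hes' hnd
      refine ⟨δ, h1, h2, ?_, ?_⟩
      · intro x hx; exact ⟨List.mem_cons_of_mem _ (h3 x hx).1, (h3 x hx).2⟩
      · intro x hx
        rcases List.mem_cons.mp hx with rfl | h
        · exact List.mem_append.mpr (Or.inl hmem)
        · exact h4 x h
    · have hA : pvStepA (pvMform N V, ds) e = (pvMform N (V ++ [e]), ds ++ [e]) := by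
        unfold pvStepA
        rw [pvMform_get N V e hb.1 hb.2]
        simp only [hmem, if_false]
        rw [if_pos trivial, pvMform_set N V e hb.1 hb.2]
      rw [List.foldl_cons, hA]
      have hnd' : (V ++ [e]).Nodup := by
        simp only [List.nodup_append, List.nodup_singleton, true_and]
        refine ⟨hnd, ?_⟩
        intro a ha b hbb
        rw [List.mem_singleton] at hbb
        subst hbb
        exact fun h => hmem (h ▸ ha)
      obtain ⟨δ, h1, h2, h3, h4⟩ := ih (V ++ [e]) (ds ++ [e]) hes' hnd'
      refine ⟨e :: δ, ?_, ?_, ?_, ?_⟩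
      · rw [h1]; simp
      · simpa [List.append_assoc] using h2
      · intro x hx
        rcases List.mem_cons.mp hx with rfl | h
        · exact ⟨List.mem_cons_self .., hmem⟩
        · refine ⟨List.mem_cons_of_mem _ (h3 x h).1, ?_⟩
          intro hxv
          exact (h3 x h).2 (List.mem_append.mpr (Or.inl hxv))
      · intro x hx
        rcases List.mem_cons.mp hx with rfl | h
        · simp
        · have := h4 x h
          simpa [List.append_assoc] using this

-- A's queue loop computes the least set containing V that is closed under succ on
-- active nodes (active = me or newly reached this phase, i.e. not in V0)
lemma pvBfsA_char (N : Nat) (me : Int) (V0 : List Int) (succ : Int → List Int)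
    (hs : ∀ x : Int, 0 ≤ x ∧ x < (N:Int) → ∀ e ∈ succ x, 0 ≤ e ∧ e < (N:Int)) :
    ∀ (fA : Nat) (V q : List Int),
    V.Nodup → (∀ x ∈ V, 0 ≤ x ∧ x < (N:Int)) → (∀ x ∈ V0, x ∈ V) →
    (∀ x ∈ q, x ∈ V) → (∀ x ∈ q, x = me ∨ x ∉ V0) →
    (∀ x ∈ V, (x = me ∨ x ∉ V0) → x ∈ q ∨ ∀ e ∈ succ x, e ∈ V) →
    q.length + N ≤ fA + V.length →
    ∃ W, pvBfsA succ fA (pvMform N V) q = pvMform N W ∧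
      (∀ x ∈ V, x ∈ W) ∧ W.Nodup ∧ (∀ x ∈ W, 0 ≤ x ∧ x < (N:Int)) ∧
      (∀ x ∈ W, (x = me ∨ x ∉ V0) → ∀ e ∈ succ x, e ∈ W) ∧
      (∀ C : List Int, (∀ x ∈ V, x ∈ C) →
        (∀ x ∈ C, (x = me ∨ x ∉ V0) → ∀ e ∈ succ x, e ∈ C) → ∀ x ∈ W, x ∈ C) := by
  intro fA
  induction fA with
  | zero =>
    intro V q hnd hb hV0 hqV hqA hproc hfuel
    cases q with
    | nil =>
      refine ⟨V, by rw [pvBfsA], fun x hx => hx, hnd, hb, ?_, ?_⟩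
      · intro x hx hact
        rcases hproc x hx hact with h | h
        · exact absurd h (List.not_mem_nil)
        · exact h
      · intro C hVC _ x hx; exact hVC x hx
    | cons a q' =>
      exfalso
      have := pvLenLe N V hnd hb
      simp only [List.length_cons] at hfuel
      omega
  | succ fA ih =>
    intro V q hnd hb hV0 hqV hqA hproc hfuel
    cases q with
    | nil =>
      refine ⟨V, by rw [pvBfsA], fun x hx => hx, hnd, hb, ?_, ?_⟩
      · intro x hx hact
        rcases hproc x hx hact with h | h
        · exact absurd h (List.not_mem_nil)
        · exact h
      · intro C hVC _ x hx; exact hVC x hx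
    | cons man rest =>
      have hman : man ∈ V := hqV man (List.mem_cons_self ..)
      have hmanb := hb man hman
      have hmanA := hqA man (List.mem_cons_self ..)
      obtain ⟨δ, hfold, hnd', hδ, hcover⟩ := pvFoldA N (succ man) V [] (hs man hmanb) hnd
      have hstep : pvBfsA succ (fA+1) (pvMform N V) (man :: rest)
          = pvBfsA succ fA (pvMform N (V ++ δ)) (rest ++ δ) := by
        rw [pvBfsA]
        have h0 : (succ man).foldl pvStepA (pvMform N V, []) = (pvMform N (V ++ δ), δ) := by
          simpa using hfold
        rw [h0]
      have hδb : ∀ x ∈ δ, 0 ≤ x ∧ x < (N:Int) := fun x hx => hs man hmanb x (hδ x hx).1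
      have hδA : ∀ x ∈ δ, x = me ∨ x ∉ V0 :=
        fun x hx => Or.inr (fun h => (hδ x hx).2 (hV0 x h))
      obtain ⟨W, h1, h2, h3, h4, h5, h6⟩ :=
        ih (V ++ δ) (rest ++ δ) hnd'
          (by intro x hx
              rcases List.mem_append.mp hx with h | h
              · exact hb x h
              · exact hδb x h)
          (fun x hx => List.mem_append.mpr (Or.inl (hV0 x hx)))
          (by intro x hx
              rcases List.mem_append.mp hx with h | h
              · exact List.mem_append.mpr (Or.inl (hqV x (List.mem_cons_of_mem _ h)))
              · exact List.mem_append.mpr (Or.inr h))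
          (by intro x hx
              rcases List.mem_append.mp hx with h | h
              · exact hqA x (List.mem_cons_of_mem _ h)
              · exact hδA x h)
          (by intro x hx hact
              rcases List.mem_append.mp hx with h | h
              · rcases hproc x h hact with hq | hsucc
                · rcases List.mem_cons.mp hq with rfl | hr
                  · exact Or.inr (fun e he => hcover e he)
                  · exact Or.inl (List.mem_append.mpr (Or.inl hr))
                · exact Or.inr (fun e he => List.mem_append.mpr (Or.inl (hsucc e he)))
              · exact Or.inl (List.mem_append.mpr (Or.inr h)))
          (by simp only [List.length_append, List.length_cons] at hfuel ⊢; omega)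
      refine ⟨W, ?_, ?_, h3, h4, h5, ?_⟩
      · rw [hstep]; exact h1
      · intro x hx; exact h2 x (List.mem_append.mpr (Or.inl hx))
      · intro C hVC hC x hx
        refine h6 C ?_ hC x hx
        intro y hy
        rcases List.mem_append.mp hy with h | h
        · exact hVC y h
        · exact hC man (hVC man hman) hmanA y (hδ y h).1

-- B's inner for-loop over one row appends exactly the fresh nodes δ (to vis AND active)
lemma pvFoldB :
    ∀ (es : List Int) (vis act : List Int) (ch : Bool),
    vis.Nodup → (∀ x ∈ act, x ∈ vis) →
    ∃ δ : List Int,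
      es.foldl pvStepB (vis, act, ch) = (vis ++ δ, act ++ δ, ch || !δ.isEmpty) ∧
      (vis ++ δ).Nodup ∧ (∀ x ∈ δ, x ∈ es ∧ x ∉ vis) ∧
      (∀ e ∈ es, e ∈ vis ++ δ) := by
  intro es
  induction es with
  | nil =>
    intro vis act ch hnd _
    exact ⟨[], by simp, by simpa using hnd, by simp, by simp⟩
  | cons e es ih =>
    intro vis act ch hnd hav
    by_cases hmem : e ∈ vis
    · have hB : pvStepB (vis, act, ch) e = (vis, act, ch) := by
        unfold pvStepB; simp [hmem]
      rw [List.foldl_cons, hB]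
      obtain ⟨δ, h1, h2, h3, h4⟩ := ih vis act ch hnd hav
      refine ⟨δ, h1, h2, ?_, ?_⟩
      · intro x hx; exact ⟨List.mem_cons_of_mem _ (h3 x hx).1, (h3 x hx).2⟩
      · intro x hx
        rcases List.mem_cons.mp hx with rfl | h
        · exact List.mem_append.mpr (Or.inl hmem)
        · exact h4 x h
    · have hB : pvStepB (vis, act, ch) e = (vis ++ [e], act ++ [e], true) := by
        unfold pvStepB
        simp only [hmem, if_false]
        rw [PySem.Set.add_of_not_mem hmem, PySem.Set.add_of_not_mem (fun h => hmem (hav e h))]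
      rw [List.foldl_cons, hB]
      have hnd' : (vis ++ [e]).Nodup := by
        simp only [List.nodup_append, List.nodup_singleton, true_and]
        refine ⟨hnd, ?_⟩
        intro a ha b hbb
        rw [List.mem_singleton] at hbb
        subst hbb
        exact fun h => hmem (h ▸ ha)
      have hav' : ∀ x ∈ act ++ [e], x ∈ vis ++ [e] := by
        intro x hx
        rcases List.mem_append.mp hx with h | h
        · exact List.mem_append.mpr (Or.inl (hav x h))
        · exact List.mem_append.mpr (Or.inr h)
      obtain ⟨δ, h1, h2, h3, h4⟩ := ih (vis ++ [e]) (act ++ [e]) true hnd' hav'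
      refine ⟨e :: δ, ?_, ?_, ?_, ?_⟩
      · rw [h1]
        simp [List.append_assoc]
      · simpa [List.append_assoc] using h2
      · intro x hx
        rcases List.mem_cons.mp hx with rfl | h
        · exact ⟨List.mem_cons_self .., hmem⟩
        · refine ⟨List.mem_cons_of_mem _ (h3 x h).1, ?_⟩
          intro hxv
          exact (h3 x h).2 (List.mem_append.mpr (Or.inl hxv))
      · intro x hx
        rcases List.mem_cons.mp hx with rfl | h
        · simp
        · have := h4 x h
          simpa [List.append_assoc] using this

-- one sweep of the table: adds exactly the fresh successors of active rows; reports
-- 'changed'; a silent sweep certifies saturation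
lemma pvSweepLem (me d : Int) (V0 : List Int) (succ : Int → List Int) :
    ∀ (its : List (Int × List (List Int))) (vis act : List Int) (ch : Bool),
    (∀ p ∈ its, succ p.1 = (PySem.List.pyGet? p.2 d).getD []) →
    vis.Nodup → (∀ x ∈ act, x ∈ vis) → (∀ x ∈ V0, x ∈ vis) →
    (∀ x ∈ act, x = me ∨ x ∉ V0) →
    ∃ δ : List Int,
      pvSweep d its vis act ch = (vis ++ δ, act ++ δ, ch || !δ.isEmpty) ∧
      (vis ++ δ).Nodup ∧
      (∀ C : List Int, (∀ x ∈ vis, x ∈ C) →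
        (∀ x ∈ C, (x = me ∨ x ∉ V0) → ∀ e ∈ succ x, e ∈ C) → ∀ x ∈ δ, x ∈ C) ∧
      (δ = [] → ∀ p ∈ its, p.1 ∈ act → ∀ e ∈ succ p.1, e ∈ vis) := by
  intro its
  induction its with
  | nil =>
    intro vis act ch _ hnd hav hV0 hactA
    refine ⟨[], by rw [pvSweep]; simp, by simpa using hnd, by simp, ?_⟩
    intro _ p hp
    exact absurd hp (List.not_mem_nil)
  | cons p tl ih =>
    intro vis act ch hrows hnd hav hV0 hactA
    obtain ⟨man, row⟩ := p
    have hrow : succ man = (PySem.List.pyGet? row d).getD [] :=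
      hrows (man, row) (List.mem_cons_self ..)
    have hrows' : ∀ q ∈ tl, succ q.1 = (PySem.List.pyGet? q.2 d).getD [] :=
      fun q hq => hrows q (List.mem_cons_of_mem _ hq)
    by_cases hmem : man ∈ act
    · obtain ⟨δ0, hfold, hnd0, hδ0, hcov0⟩ :=
        pvFoldB ((PySem.List.pyGet? row d).getD []) vis act ch hnd hav
      have hstep : pvSweep d ((man, row) :: tl) vis act ch
          = pvSweep d tl (vis ++ δ0) (act ++ δ0) (ch || !δ0.isEmpty) := by
        rw [pvSweep, if_pos hmem, hfold]
      have hav0 : ∀ x ∈ act ++ δ0, x ∈ vis ++ δ0 := by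
        intro x hx
        rcases List.mem_append.mp hx with h | h
        · exact List.mem_append.mpr (Or.inl (hav x h))
        · exact List.mem_append.mpr (Or.inr h)
      have hV00 : ∀ x ∈ V0, x ∈ vis ++ δ0 :=
        fun x hx => List.mem_append.mpr (Or.inl (hV0 x hx))
      have hactA0 : ∀ x ∈ act ++ δ0, x = me ∨ x ∉ V0 := by
        intro x hx
        rcases List.mem_append.mp hx with h | h
        · exact hactA x h
        · exact Or.inr (fun hv => (hδ0 x h).2 (hV0 x hv))
      obtain ⟨δ1, h1, h2, h3, h4⟩ :=
        ih (vis ++ δ0) (act ++ δ0) (ch || !δ0.isEmpty) hrows' hnd0 hav0 hV00 hactA0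
      refine ⟨δ0 ++ δ1, ?_, ?_, ?_, ?_⟩
      · rw [hstep, h1]
        have hbool : (ch || !δ0.isEmpty || !δ1.isEmpty) = (ch || !(δ0 ++ δ1).isEmpty) := by
          cases δ0 <;> cases δ1 <;> simp
        rw [hbool]
        simp [List.append_assoc]
      · simpa [List.append_assoc] using h2
      · intro C hvisC hC x hx
        have hδ0C : ∀ y ∈ δ0, y ∈ C := by
          intro y hy
          have : y ∈ succ man := by rw [hrow]; exact (hδ0 y hy).1
          exact hC man (hvisC man (hav man hmem)) (hactA man hmem) y this
        rcases List.mem_append.mp hx with h | h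
        · exact hδ0C x h
        · refine h3 C ?_ hC x h
          intro y hy
          rcases List.mem_append.mp hy with h' | h'
          · exact hvisC y h'
          · exact hδ0C y h'
      · intro hδnil
        have hδ0nil : δ0 = [] := by
          cases δ0 with
          | nil => rfl
          | cons a t => simp at hδnil
        have hδ1nil : δ1 = [] := by
          cases δ1 with
          | nil => rfl
          | cons a t => rw [hδ0nil] at hδnil; simp at hδnil
        intro q hq hqact e he
        rcases List.mem_cons.mp hq with rfl | hqtl
        · have h := hcov0 e (by rw [← hrow]; exact he)
          rw [hδ0nil] at h
          simpa using h
        · have := h4 hδ1nil q hqtl (by rw [hδ0nil]; simpa using hqact) e he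
          simpa [hδ0nil] using this
    · have hstep : pvSweep d ((man, row) :: tl) vis act ch = pvSweep d tl vis act ch := by
        rw [pvSweep, if_neg hmem]
      obtain ⟨δ, h1, h2, h3, h4⟩ := ih vis act ch hrows' hnd hav hV0 hactA
      refine ⟨δ, by rw [hstep]; exact h1, h2, h3, ?_⟩
      intro hδnil q hq hqact e he
      rcases List.mem_cons.mp hq with rfl | hqtl
      · exact absurd hqact hmem
      · exact h4 hδnil q hqtl hqact e he

-- the saturation loop computes the same least closed set
lemma pvSatLem (me d : Int) (N : Nat) (V0 : List Int) (succ : Int → List Int)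
    (items : List (Int × List (List Int)))
    (hs : ∀ x : Int, 0 ≤ x ∧ x < (N:Int) → ∀ e ∈ succ x, 0 ≤ e ∧ e < (N:Int))
    (hsucc1 : ∀ p ∈ items, succ p.1 = (PySem.List.pyGet? p.2 d).getD [])
    (hsucc2 : ∀ x : Int, x ∉ items.map Prod.fst → succ x = []) :
    ∀ (fuel : Nat) (vis act : List Int),
    vis.Nodup → (∀ x ∈ vis, 0 ≤ x ∧ x < (N:Int)) → (∀ x ∈ V0, x ∈ vis) →
    (∀ x ∈ act, x ∈ vis) → (∀ x ∈ act, x = me ∨ x ∉ V0) →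
    (∀ x ∈ vis, (x = me ∨ x ∉ V0) → x ∈ act) →
    N + 2 ≤ fuel + vis.length →
    ∃ W, pvSat d items fuel vis act = W ∧
      (∀ x ∈ vis, x ∈ W) ∧ W.Nodup ∧ (∀ x ∈ W, 0 ≤ x ∧ x < (N:Int)) ∧
      (∀ x ∈ W, (x = me ∨ x ∉ V0) → ∀ e ∈ succ x, e ∈ W) ∧
      (∀ C : List Int, (∀ x ∈ vis, x ∈ C) →
        (∀ x ∈ C, (x = me ∨ x ∉ V0) → ∀ e ∈ succ x, e ∈ C) → ∀ x ∈ W, x ∈ C) := by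
  intro fuel
  induction fuel with
  | zero =>
    intro vis act hnd hb hV0 hav hactA hcov hfuel
    exfalso
    have := pvLenLe N vis hnd hb
    omega
  | succ fuel ih =>
    intro vis act hnd hb hV0 hav hactA hcov hfuel
    obtain ⟨δ, hsw, hnd', hδC, hfix⟩ :=
      pvSweepLem me d V0 succ items vis act false hsucc1 hnd hav hV0 hactA
    have hstep : pvSat d items (fuel+1) vis act
        = if (false || !δ.isEmpty) then pvSat d items fuel (vis ++ δ) (act ++ δ) else vis ++ δ := by
      rw [pvSat, hsw]
    cases δ with
    | nil =>
      have hres : pvSat d items (fuel+1) vis act = vis := by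
        rw [hstep]; simp
      refine ⟨vis, hres, fun x hx => hx, hnd, hb, ?_, ?_⟩
      · intro x hx hact e he
        by_cases hkey : x ∈ items.map Prod.fst
        · obtain ⟨p, hp, hpx⟩ := by
            simpa only [List.mem_map] using hkey
          subst hpx
          exact hfix rfl p hp (hcov p.1 hx hact) e he
        · rw [hsucc2 x hkey] at he
          exact absurd he (List.not_mem_nil)
      · intro C hvisC _ x hx; exact hvisC x hx
    | cons a δt =>
      have hR : ∀ x : Int, x ∈ (List.range N).map (fun (i : Nat) => (i : Int)) ↔
          (0 ≤ x ∧ x < (N:Int)) := by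
        intro x
        simp only [List.mem_map, List.mem_range]
        constructor
        · rintro ⟨i, hi, rfl⟩; omega
        · rintro ⟨h0, h1⟩; exact ⟨x.toNat, by omega, by omega⟩
      have hδb : ∀ x ∈ (a :: δt), 0 ≤ x ∧ x < (N:Int) := by
        intro x hx
        have := hδC ((List.range N).map (fun (i : Nat) => (i : Int)))
          (fun y hy => (hR y).mpr (hb y hy))
          (fun y hyR hyA e he => (hR e).mpr (hs y ((hR y).mp hyR) e he)) x hx
        exact (hR x).mp this
      obtain ⟨_, _, hdisj⟩ := List.nodup_append.mp hnd'
      obtain ⟨W, h1, h2, h3, h4, h5, h6⟩ :=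
        ih (vis ++ a :: δt) (act ++ a :: δt)
          hnd'
          (by intro x hx
              rcases List.mem_append.mp hx with h | h
              · exact hb x h
              · exact hδb x h)
          (fun x hx => List.mem_append.mpr (Or.inl (hV0 x hx)))
          (by intro x hx
              rcases List.mem_append.mp hx with h | h
              · exact List.mem_append.mpr (Or.inl (hav x h))
              · exact List.mem_append.mpr (Or.inr h))
          (by intro x hx
              rcases List.mem_append.mp hx with h | h
              · exact hactA x h
              · exact Or.inr (fun hv => hdisj x (hV0 x hv) x h rfl))
          (by intro x hx hact
              rcases List.mem_append.mp hx with h | h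
              · exact List.mem_append.mpr (Or.inl (hcov x h hact))
              · exact List.mem_append.mpr (Or.inr h))
          (by simp only [List.length_append, List.length_cons] at hfuel ⊢; omega)
      have hres : pvSat d items (fuel+1) vis act = pvSat d items fuel (vis ++ a :: δt) (act ++ a :: δt) := by
        rw [hstep]
        simp
      refine ⟨W, by rw [hres]; exact h1, ?_, h3, h4, h5, ?_⟩
      · intro x hx; exact h2 x (List.mem_append.mpr (Or.inl hx))
      · intro C hvisC hC x hx
        refine h6 C ?_ hC x hx
        intro y hy
        rcases List.mem_append.mp hy with h | h
        · exact hvisC y h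
        · exact hδC C hvisC hC y h

-- under Pre_, every neighbour list holds players 0..n only
lemma pvSuccBound (n : Int) (table : List (Int × List (List Int))) (d : Int)
    (hd : d = 0 ∨ d = 1)
    (hp : ∀ p ∈ table, (0 ≤ p.1 ∧ p.1 ≤ n) →
      2 ≤ p.2.length ∧ ∀ l ∈ p.2.take 2, ∀ x ∈ l, 0 ≤ x ∧ x ≤ n)
    (hn : 0 ≤ n) :
    ∀ x : Int, 0 ≤ x ∧ x < (((n+1).toNat : Nat) : Int) →
      ∀ e ∈ pvSucc table d x, 0 ≤ e ∧ e < (((n+1).toNat : Nat) : Int) := by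
  have hNi : (((n+1).toNat : Nat) : Int) = n + 1 := Int.toNat_of_nonneg (by omega)
  intro x hx e he
  cases hget : (PySem.Dict.mk table).get? x with
  | none =>
    have hsucc : pvSucc table d x = [] := by unfold pvSucc; rw [hget]
    rw [hsucc] at he; simp at he
  | some ls =>
    have hsucc : pvSucc table d x = (PySem.List.pyGet? ls d).getD [] := by
      unfold pvSucc; rw [hget]
    rw [hsucc] at he
    have hmem : (x, ls) ∈ (PySem.Dict.mk table).items :=
      PySem.Dict.mem_items_of_get?_eq_some _ hget
    have htab2 : (x, ls) ∈ table := by simpa [PySem.Dict.items] using hmem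
    obtain ⟨hlen, hbound⟩ := hp _ htab2 ⟨hx.1, by omega⟩
    cases ls with
    | nil => simp at hlen
    | cons l0 tl =>
      cases tl with
      | nil => simp at hlen
      | cons l1 rest =>
        have htake : (l0 :: l1 :: rest).take 2 = [l0, l1] := rfl
        rcases hd with rfl | rfl
        · have hg : PySem.List.pyGet? (l0 :: l1 :: rest) 0 = some l0 := by
            simp [PySem.List.pyGet?, PySem.List.pyIdx?, show (0:Int) ≤ (rest.length:Int)+1 by omega]
          rw [hg] at he
          simp only [Option.getD_some] at he
          have := hbound l0 (by rw [htake]; simp) e he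
          exact ⟨this.1, by omega⟩
        · have hg : PySem.List.pyGet? (l0 :: l1 :: rest) 1 = some l1 := by
            simp [PySem.List.pyGet?, PySem.List.pyIdx?]
          rw [hg] at he
          simp only [Option.getD_some] at he
          have := hbound l1 (by rw [htake]; simp) e he
          exact ⟨this.1, by omega⟩

-- when me is no key at all, both searches stop immediately
lemma pvBfsA_isolated (succ : Int → List Int) (f : Nat) (m : List Int) (x : Int)
    (h : succ x = []) : pvBfsA succ (f+1) m [x] = m := by
  rw [pvBfsA, h]
  simp only [List.foldl_nil, List.nil_append]
  rw [pvBfsA]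

lemma pvSweep_id (d : Int) :
    ∀ (its : List (Int × List (List Int))) (vis act : List Int) (ch : Bool),
    (∀ p ∈ its, p.1 ∉ act) → pvSweep d its vis act ch = (vis, act, ch) := by
  intro its
  induction its with
  | nil => intro vis act ch _; rw [pvSweep]
  | cons p tl ih =>
    intro vis act ch h
    obtain ⟨man, row⟩ := p
    rw [pvSweep]
    rw [if_neg (h (man, row) (List.mem_cons_self ..))]
    exact ih vis act ch (fun q hq => h q (List.mem_cons_of_mem _ hq))

lemma pvSat_iso (d : Int) (its : List (Int × List (List Int))) (f : Nat)
    (vis act : List Int) (h : ∀ p ∈ its, p.1 ∉ act) :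
    pvSat d its (f+1) vis act = vis := by
  rw [pvSat, pvSweep_id d its vis act false h]
  simp

-- ===== VERDICT (by name: the statement is the Claim_ definition above) =====
theorem getMatcher_spec : Claim_equal_getMatcher := by
  intro me n table _hdom hpre
  obtain ⟨hme0, hmen, hnodup, hcase⟩ := hpre
  unfold Spec_getMatcher
  have hn0 : (0:Int) ≤ n := le_trans hme0 hmen
  set N : Nat := (n+1).toNat with hN
  have hNi : ((N : Nat) : Int) = n + 1 := Int.toNat_of_nonneg (by omega)
  have hmeN : me < (N:Int) := by omega
  have hinit : PySem.List.pySetD (List.replicate N (0:Int)) me 1 = pvMform N [me] := by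
    have h0 : List.replicate N (0:Int) = pvMform N [] := by simp [pvMform]
    rw [h0]
    simpa using pvMform_set N [] me hme0 hmeN
  have hset : (PySem.Set.add PySem.Set.empty me : PySem.Set Int) = [me] := by
    rw [PySem.Set.add_of_not_mem (by simp [PySem.Set.empty])]
    rfl
  have hone : ∀ x ∈ ([me] : List Int), 0 ≤ x ∧ x < (N:Int) := by
    intro x hx; rw [List.mem_singleton] at hx; subst hx; exact ⟨hme0, hmeN⟩
  show (pvBfsA (pvSucc table 1) (N+1)
          (pvBfsA (pvSucc table 0) (N+1)
            (PySem.List.pySetD (List.replicate N (0:Int)) me 1) [me]) [me]).sum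
      = PySem.Set.len (pvSat 1 table (N+1)
          (pvSat 0 table (N+1) (PySem.Set.add PySem.Set.empty me)
            (PySem.Set.add PySem.Set.empty me)) (PySem.Set.add PySem.Set.empty me))
  rw [hinit, hset]
  rcases hcase with hiso | htab
  · -- me is no key: both loops stop at once and count exactly {me}
    have hget : (PySem.Dict.mk table).get? me = none := by
      rw [PySem.Dict.get?_eq_none_iff_not_mem_keys]
      simpa [PySem.Dict.keys, PySem.Dict.items] using hiso
    have hsucc : ∀ d : Int, pvSucc table d me = [] := by
      intro d; unfold pvSucc; rw [hget]
    have hnotkey : ∀ p ∈ table, p.1 ∉ ([me] : List Int) := by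
      intro p hp h
      rw [List.mem_singleton] at h
      exact hiso (List.mem_map.mpr ⟨p, hp, h⟩)
    rw [pvBfsA_isolated _ _ _ _ (hsucc 0), pvBfsA_isolated _ _ _ _ (hsucc 1),
        pvSat_iso 0 table N [me] [me] hnotkey, pvSat_iso 1 table N [me] [me] hnotkey,
        pvSumMform N [me] (List.nodup_singleton me) hone]
    simp [PySem.Set.len]
  · -- general case: both compute the same least closed sets, phase by phase
    have hs0 := pvSuccBound n table 0 (Or.inl rfl) htab hn0
    have hs1 := pvSuccBound n table 1 (Or.inr rfl) htab hn0
    rw [← hN] at hs0 hs1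
    have hkeysnd : (PySem.Dict.mk table).keys.Nodup := by
      simpa [PySem.Dict.keys, PySem.Dict.items] using hnodup
    have hsucc1 : ∀ d : Int, ∀ p ∈ table, pvSucc table d p.1 = (PySem.List.pyGet? p.2 d).getD [] := by
      intro d p hp
      have hget : (PySem.Dict.mk table).get? p.1 = some p.2 := by
        have hp' : (p.1, p.2) ∈ (PySem.Dict.mk table).items := by
          simpa [PySem.Dict.items] using hp
        exact PySem.Dict.get?_of_mem_items _ hp' hkeysnd
      unfold pvSucc; rw [hget]
    have hsucc2 : ∀ d : Int, ∀ x : Int, x ∉ table.map Prod.fst → pvSucc table d x = [] := by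
      intro d x hx
      have hget : (PySem.Dict.mk table).get? x = none := by
        rw [PySem.Dict.get?_eq_none_iff_not_mem_keys]
        simpa [PySem.Dict.keys, PySem.Dict.items] using hx
      unfold pvSucc; rw [hget]
    -- phase 1 (direction 0): everyone reached is active
    obtain ⟨W1A, hA1, hVW1, hnd1, hb1, hcl1, hmin1⟩ :=
      pvBfsA_char N me [] (pvSucc table 0) hs0 (N+1) [me] [me]
        (List.nodup_singleton me) hone
        (fun x hx => absurd hx (List.not_mem_nil))
        (fun x hx => hx)
        (fun x _ => Or.inr (List.not_mem_nil))
        (fun x hx _ => Or.inl hx)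
        (by simp only [List.length_cons, List.length_nil]; omega)
    obtain ⟨W1B, hB1, hVW1B, hnd1B, hb1B, hcl1B, hmin1B⟩ :=
      pvSatLem me 0 N [] (pvSucc table 0) table hs0 (hsucc1 0) (hsucc2 0) (N+1) [me] [me]
        (List.nodup_singleton me) hone
        (fun x hx => absurd hx (List.not_mem_nil))
        (fun x hx => hx)
        (fun x _ => Or.inr (List.not_mem_nil))
        (fun x hx _ => hx)
        (by simp only [List.length_cons, List.length_nil]; omega)
    have hm1 : ∀ x : Int, x ∈ W1A ↔ x ∈ W1B := by
      intro x
      constructor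
      · exact fun hx => hmin1 W1B (fun y hy => hVW1B y hy) hcl1B x hx
      · exact fun hx => hmin1B W1A (fun y hy => hVW1 y hy) hcl1 x hx
    have hmeW1A : me ∈ W1A := hVW1 me (List.mem_singleton.mpr rfl)
    have hmeW1B : me ∈ W1B := hVW1B me (List.mem_singleton.mpr rfl)
    have hW1Blen : 1 ≤ W1B.length := List.length_pos_of_mem hmeW1B
    -- phase 2 (direction 1): only me and newly reached players are active
    obtain ⟨W2A, hA2, hVW2, hnd2, hb2, hcl2, hmin2⟩ :=
      pvBfsA_char N me W1A (pvSucc table 1) hs1 (N+1) W1A [me]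
        hnd1 hb1
        (fun x hx => hx)
        (by intro x hx; rw [List.mem_singleton] at hx; subst hx; exact hmeW1A)
        (fun x hx => Or.inl (List.mem_singleton.mp hx))
        (by intro x hx hact
            rcases hact with rfl | hnin
            · exact Or.inl (List.mem_singleton.mpr rfl)
            · exact absurd hx hnin)
        (by have := List.length_pos_of_mem hmeW1A
            simp only [List.length_cons, List.length_nil]
            omega)
    obtain ⟨W2B, hB2, hVW2B, hnd2B, hb2B, hcl2B, hmin2B⟩ :=
      pvSatLem me 1 N W1A (pvSucc table 1) table hs1 (hsucc1 1) (hsucc2 1) (N+1) W1B [me]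
        hnd1B hb1B
        (fun x hx => (hm1 x).mp hx)
        (by intro x hx; rw [List.mem_singleton] at hx; subst hx; exact hmeW1B)
        (fun x hx => Or.inl (List.mem_singleton.mp hx))
        (by intro x hx hact
            rcases hact with rfl | hnin
            · exact List.mem_singleton.mpr rfl
            · exact absurd ((hm1 x).mpr hx) hnin)
        (by omega)
    have hm2 : ∀ x : Int, x ∈ W2A ↔ x ∈ W2B := by
      intro x
      constructor
      · exact fun hx => hmin2 W2B (fun y hy => hVW2B y ((hm1 y).mp hy)) hcl2B x hx
      · exact fun hx => hmin2B W2A (fun y hy => hVW2 y ((hm1 y).mpr hy)) hcl2 x hx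
    have hlen : W2A.length = W2B.length :=
      List.Perm.length_eq ((List.perm_ext_iff_of_nodup hnd2 hnd2B).mpr hm2)
    rw [hA1, hB1, hA2, hB2, pvSumMform N W2A hnd2 hb2, hlen]
    simp [PySem.Set.len]
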